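-- pv_equiv track=rewrite | github.com/nguyentieuat/ai-korean-study-partner | ai-korean-be/tqg_service/train_generator_pq_fulljsonl.py | find_any_subseq
-- ===== SOURCE A (Python) =====
-- from typing import Dict, Any, Iterable, List, Tuple
--
-- def find_any_subseq(hay: List[int], needles: List[List[int]]) -> Tuple[int, int]:
--     """
--     Tìm vị trí sớm nhất của BẤT KỲ biến thể TAG nào trong chuỗi token 'hay'.
--     Trả về (pos_bat_dau, do_dai_mau) hoặc (-1, 0) nếu không thấy.
--     """
--     best = (len(hay) + 1, 0)
--     for nd in needles:
--         L = len(nd)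
--         if L == 0:
--             continue
--         for i in range(0, len(hay) - L + 1):
--             if hay[i:i+L] == nd:
--                 if i < best[0]:
--                     best = (i, L)
--                 break
--     if best[0] <= len(hay):
--         return best
--     return (-1, 0)
-- ===== SOURCE B (Python) =====
-- def find_any_subseq(hay, needles):
--     nds = [nd for nd in needles if nd]
--     for i in range(len(hay)):
--         for nd in nds:
--             if hay[i:i+len(nd)] == nd:
--                 return (i, len(nd))
--     return (-1, 0)
-- ===== Notes on version B (the rewrite author's own statement) =====
-- stated objective: alternative
-- what changed: A loops needle-by-needle, scanning the whole haystack per needle and tracking a running best position; B makes a single left-to-right scan over haystack positions and returns at the first position where any (nonempty) needle matches, which provably yields the same winner and tie-break.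
import Mathlib
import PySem

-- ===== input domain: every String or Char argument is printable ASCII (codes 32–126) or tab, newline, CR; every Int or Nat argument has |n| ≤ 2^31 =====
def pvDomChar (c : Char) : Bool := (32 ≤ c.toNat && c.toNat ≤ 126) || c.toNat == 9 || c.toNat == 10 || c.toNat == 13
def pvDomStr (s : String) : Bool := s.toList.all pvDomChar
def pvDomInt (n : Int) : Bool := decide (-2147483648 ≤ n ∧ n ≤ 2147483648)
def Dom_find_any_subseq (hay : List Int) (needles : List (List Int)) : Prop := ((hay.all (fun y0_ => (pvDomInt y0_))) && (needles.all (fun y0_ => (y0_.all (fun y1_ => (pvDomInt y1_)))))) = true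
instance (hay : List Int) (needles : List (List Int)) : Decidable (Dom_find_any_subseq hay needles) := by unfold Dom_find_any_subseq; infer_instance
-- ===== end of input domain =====

-- B replaces A's needle-outer scan-with-best-tracking by a single position-outer scan with early exit (same results, same tie-break; alternative structure, not claimed faster).


-- ===== PORT A =====
-- inner 'for i in range(0, len(hay)-L+1): if hay[i:i+L]==nd: … break' — returns the first matching i
def pvAFind (hay nd : List Int) (i : Nat) (stop : Int) : Option Nat :=
  if h : (i : Int) < stop then
    if PySem.List.slice hay (some (i : Int)) (some ((i : Int) + (nd.length : Int))) = nd then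
      some i
    else pvAFind hay nd (i + 1) stop
  else none
termination_by (stop - (i : Int)).toNat
decreasing_by omega

def find_any_subseq (hay : List Int) (needles : List (List Int)) : Int × Int :=
  let best := needles.foldl (fun best nd =>
    let L := nd.length
    if L = 0 then best
    else
      match pvAFind hay nd 0 ((hay.length : Int) - (L : Int) + 1) with
      | some i => if (i : Int) < best.1 then ((i : Int), (L : Int)) else best
      | none => best) ((hay.length : Int) + 1, 0)
  if best.1 ≤ (hay.length : Int) then best else (-1, 0)

-- ===== PORT B =====
-- inner 'for nd in nds: if hay[i:i+len(nd)]==nd: return (i, len(nd))'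
def pvBTry (hay : List Int) (i : Nat) : List (List Int) → Option (Int × Int)
  | [] => none
  | nd :: t =>
    if PySem.List.slice hay (some (i : Int)) (some ((i : Int) + (nd.length : Int))) = nd then
      some ((i : Int), (nd.length : Int))
    else pvBTry hay i t

-- outer 'for i in range(len(hay)): …' with early return
def pvBScan (hay : List Int) (nds : List (List Int)) (i : Nat) : Int × Int :=
  if h : i < hay.length then
    match pvBTry hay i nds with
    | some r => r
    | none => pvBScan hay nds (i + 1)
  else (-1, 0)
termination_by hay.length - i

def find_any_subseq_alt (hay : List Int) (needles : List (List Int)) : Int × Int :=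
  pvBScan hay (needles.filter (fun nd => !nd.isEmpty)) 0

-- ===== PRECONDITION & SPEC =====
def Spec_find_any_subseq (hay : List Int) (needles : List (List Int)) (out : Int × Int) : Prop := out = find_any_subseq_alt hay needles
instance (hay : List Int) (needles : List (List Int)) (out : Int × Int) : Decidable (Spec_find_any_subseq hay needles out) := by unfold Spec_find_any_subseq; infer_instance

-- ===== CLAIM (what is proved, stated in full; the proofs are below) =====
def Claim_equal_find_any_subseq : Prop := ∀ (hay : List Int) (needles : List (List Int)), Dom_find_any_subseq hay needles → Spec_find_any_subseq hay needles (find_any_subseq hay needles)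

-- ===== LEMMAS AND PROOFS =====

-- 'nd matches in hay at position i'
def pvM (hay nd : List Int) (i : Nat) : Bool := (hay.drop i).take nd.length == nd

theorem pvM_bound (hay nd : List Int) (i : Nat) (hne : nd ≠ []) (hm : pvM hay nd i = true) :
    i + nd.length ≤ hay.length := by
  have heq : (hay.drop i).take nd.length = nd := by simpa [pvM] using hm
  have h1 : ((hay.drop i).take nd.length).length = nd.length := by rw [heq]
  have h2 : nd.length ≠ 0 := by simpa using hne
  simp [List.length_take, List.length_drop] at h1
  omega

theorem pvAFind_some (hay nd : List Int) (i : Nat) (stop : Int) (j : Nat)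
    (h : pvAFind hay nd i stop = some j) :
    i ≤ j ∧ (j : Int) < stop ∧ pvM hay nd j = true ∧ ∀ k, i ≤ k → k < j → pvM hay nd k = false := by
  induction i using pvAFind.induct hay nd stop with
  | case1 i hlt hm =>
    rw [pvAFind, dif_pos hlt, if_pos hm] at h
    obtain rfl : i = j := by injection h
    refine ⟨le_refl _, hlt, ?_, by omega⟩
    simpa [pvM, PySem.List.slice_natCast_add] using hm
  | case2 i hlt hm ih =>
    rw [pvAFind, dif_pos hlt, if_neg hm] at h
    obtain ⟨h1, h2, h3, h4⟩ := ih h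
    refine ⟨by omega, h2, h3, ?_⟩
    intro k hk1 hk2
    rcases Nat.eq_or_lt_of_le hk1 with rfl | hk
    · simpa [pvM, PySem.List.slice_natCast_add] using hm
    · exact h4 k hk hk2
  | case3 i hlt =>
    rw [pvAFind, dif_neg hlt] at h
    exact absurd h (by simp)

theorem pvAFind_none (hay nd : List Int) (i : Nat) (stop : Int)
    (h : pvAFind hay nd i stop = none) :
    ∀ k, i ≤ k → (k : Int) < stop → pvM hay nd k = false := by
  induction i using pvAFind.induct hay nd stop with
  | case1 i hlt hm =>
    rw [pvAFind, dif_pos hlt, if_pos hm] at h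
    exact absurd h (by simp)
  | case2 i hlt hm ih =>
    rw [pvAFind, dif_pos hlt, if_neg hm] at h
    intro k hk1 hk2
    rcases Nat.eq_or_lt_of_le hk1 with rfl | hk
    · simpa [pvM, PySem.List.slice_natCast_add] using hm
    · exact ih h k hk hk2
  | case3 i hlt =>
    intro k hk1 hk2
    exfalso; apply hlt
    have : (i : Int) ≤ (k : Int) := by exact_mod_cast hk1
    omega
def pvOcc (hay nd : List Int) : Option Nat :=
  pvAFind hay nd 0 ((hay.length : Int) - (nd.length : Int) + 1)
def pvMin (hay : List Int) : List (List Int) → Option (Nat × Nat)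
  | [] => none
  | nd :: t =>
    match pvOcc hay nd, pvMin hay t with
    | none, r => r
    | some i, none => some (i, nd.length)
    | some i, some (j, Lj) => if i ≤ j then some (i, nd.length) else some (j, Lj)

theorem pvOcc_some (hay nd : List Int) (j : Nat) (h : pvOcc hay nd = some j) :
    pvM hay nd j = true ∧ ∀ k, k < j → pvM hay nd k = false := by
  obtain ⟨_, _, h3, h4⟩ := pvAFind_some hay nd 0 _ j h
  exact ⟨h3, fun k hk => h4 k (Nat.zero_le k) hk⟩

theorem pvOcc_of_match (hay nd : List Int) (i : Nat) (hne : nd ≠ []) (hm : pvM hay nd i = true) :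
    ∃ j, pvOcc hay nd = some j ∧ j ≤ i := by
  have hb := pvM_bound hay nd i hne hm
  have hstop : (i : Int) < (hay.length : Int) - (nd.length : Int) + 1 := by
    have h2 : nd.length ≠ 0 := by simpa using hne
    omega
  cases hj : pvOcc hay nd with
  | none => exact absurd hm (by simpa using pvAFind_none hay nd 0 _ hj i (Nat.zero_le i) hstop)
  | some j =>
    refine ⟨j, rfl, ?_⟩
    by_contra hlt
    have := (pvOcc_some hay nd j hj).2 i (by omega)
    simp [hm] at this
theorem pvMin_some_mem (hay : List Int) (nds : List (List Int)) (j L : Nat)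
    (h : pvMin hay nds = some (j, L)) :
    ∃ nd ∈ nds, pvOcc hay nd = some j ∧ nd.length = L := by
  induction nds with
  | nil => simp [pvMin] at h
  | cons nd t ih =>
    cases ho : pvOcc hay nd with
    | none =>
      simp only [pvMin, ho] at h
      obtain ⟨nd', h1, h2⟩ := ih h
      exact ⟨nd', by simp [h1], h2⟩
    | some i =>
      cases hr : pvMin hay t with
      | none =>
        simp only [pvMin, ho, hr, Option.some_inj, Prod.mk.injEq] at h
        obtain ⟨rfl, rfl⟩ := h
        exact ⟨nd, by simp, ho, rfl⟩
      | some p =>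
        obtain ⟨j', Lj⟩ := p
        by_cases hij : i ≤ j'
        · simp only [pvMin, ho, hr, if_pos hij, Option.some_inj, Prod.mk.injEq] at h
          obtain ⟨rfl, rfl⟩ := h
          exact ⟨nd, by simp, ho, rfl⟩
        · simp only [pvMin, ho, hr, if_neg hij, Option.some_inj, Prod.mk.injEq] at h
          obtain ⟨rfl, rfl⟩ := h
          obtain ⟨nd', h1, h2⟩ := ih hr
          exact ⟨nd', by simp [h1], h2⟩

theorem pvMin_none (hay : List Int) (nds : List (List Int))
    (h : ∀ nd ∈ nds, pvOcc hay nd = none) : pvMin hay nds = none := by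
  induction nds with
  | nil => rfl
  | cons nd t ih =>
    rw [pvMin, h nd (by simp), ih (fun nd' h' => h nd' (by simp [h']))]
theorem pvFoldA_filter (hay : List Int) (nds : List (List Int)) (init : Int × Int) :
    nds.foldl (fun best nd =>
      let L := nd.length
      if L = 0 then best
      else
        match pvAFind hay nd 0 ((hay.length : Int) - (L : Int) + 1) with
        | some i => if (i : Int) < best.1 then ((i : Int), (L : Int)) else best
        | none => best) init
    = (nds.filter (fun nd => !nd.isEmpty)).foldl (fun best nd =>
        match pvOcc hay nd with
        | some i => if (i : Int) < best.1 then ((i : Int), (nd.length : Int)) else best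
        | none => best) init := by
  induction nds generalizing init with
  | nil => rfl
  | cons nd t ih =>
    by_cases h0 : nd.length = 0
    · have he : nd.isEmpty = true := by simpa using h0
      have h0' : (nd.length : Int) = 0 := by exact_mod_cast h0
      simp only [List.foldl_cons, List.filter_cons, he, Bool.not_true, if_pos h0']
      simpa using ih init
    · have he : nd.isEmpty = false := by
        simpa [List.isEmpty_iff, List.length_eq_zero_iff] using h0
      have h0' : ¬ ((nd.length : Int) = 0) := by exact_mod_cast h0
      simp only [List.foldl_cons, List.filter_cons, he, Bool.not_false, if_neg h0']
      simp only [if_pos trivial]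
      rw [ih, List.foldl_cons]
      rfl

theorem pvFoldA_eq (hay : List Int) (nds : List (List Int)) (b l : Int) :
    nds.foldl (fun best nd =>
        match pvOcc hay nd with
        | some i => if (i : Int) < best.1 then ((i : Int), (nd.length : Int)) else best
        | none => best) (b, l)
    = match pvMin hay nds with
      | none => (b, l)
      | some (i, L) => if (i : Int) < b then ((i : Int), (L : Int)) else (b, l) := by
  induction nds generalizing b l with
  | nil => rfl
  | cons nd t ih =>
    cases ho : pvOcc hay nd with
    | none => simp only [List.foldl_cons, ho, pvMin]; exact ih b l
    | some i =>
      simp only [List.foldl_cons, ho, pvMin]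
      by_cases hib : (i : Int) < b
      · rw [if_pos hib, ih]
        cases hr : pvMin hay t with
        | none => simp [hib]
        | some p =>
          obtain ⟨j, Lj⟩ := p
          by_cases hij : i ≤ j
          · have hji : ¬ ((j : Int) < (i : Int)) := by exact_mod_cast not_lt.mpr hij
            simp [hij, hji, hib]
          · have hji : (j : Int) < (i : Int) := by exact_mod_cast Nat.lt_of_not_le hij
            have hjb : (j : Int) < b := lt_trans hji hib
            simp [hij, hji, hjb]
      · rw [if_neg hib, ih]
        cases hr : pvMin hay t with
        | none => simp [hib]
        | some p =>
          obtain ⟨j, Lj⟩ := p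
          by_cases hij : i ≤ j
          · have hjb : ¬ ((j : Int) < b) := by
              have : (i : Int) ≤ (j : Int) := by exact_mod_cast hij
              omega
            simp [hij, hjb, hib]
          · simp [hij]
theorem pvBTry_none (hay : List Int) (i : Nat) (nds : List (List Int))
    (h : pvBTry hay i nds = none) : ∀ nd ∈ nds, pvM hay nd i = false := by
  induction nds with
  | nil => simp
  | cons nd t ih =>
    rw [pvBTry] at h
    by_cases hm : PySem.List.slice hay (some (i : Int)) (some ((i : Int) + (nd.length : Int))) = nd
    · rw [if_pos hm] at h; exact absurd h (by simp)
    · rw [if_neg hm] at h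
      intro nd' hnd'
      rcases List.mem_cons.mp hnd' with rfl | hmem
      · simpa [pvM, PySem.List.slice_natCast_add] using hm
      · exact ih h nd' hmem

theorem pvBTry_some (hay : List Int) (i : Nat) (nds : List (List Int))
    (hne : ∀ nd ∈ nds, nd ≠ [])
    (hprev : ∀ k, k < i → ∀ nd ∈ nds, pvM hay nd k = false)
    (r : Int × Int) (h : pvBTry hay i nds = some r) :
    ∃ L, pvMin hay nds = some (i, L) ∧ r = ((i : Int), (L : Int)) := by
  induction nds with
  | nil => simp [pvBTry] at h
  | cons nd t ih =>
    rw [pvBTry] at h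
    by_cases hm : PySem.List.slice hay (some (i : Int)) (some ((i : Int) + (nd.length : Int))) = nd
    · rw [if_pos hm] at h
      have hmi : pvM hay nd i = true := by simpa [pvM, PySem.List.slice_natCast_add] using hm
      obtain ⟨j, hj, hji⟩ := pvOcc_of_match hay nd i (hne nd (by simp)) hmi
      have hij : j = i := by
        rcases Nat.eq_or_lt_of_le hji with rfl | hlt
        · rfl
        · have := hprev j hlt nd (by simp)
          have := (pvOcc_some hay nd j hj).1
          simp_all
      subst hij
      refine ⟨nd.length, ?_, (Option.some_inj.mp h).symm⟩
      cases hr : pvMin hay t with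
      | none => simp only [pvMin, hj, hr]
      | some p =>
        obtain ⟨j', Lj⟩ := p
        have hjge : j ≤ j' := by
          obtain ⟨nd', hmem, ho', _⟩ := pvMin_some_mem hay t j' Lj hr
          by_contra hlt
          have := hprev j' (by omega) nd' (by simp [hmem])
          have := (pvOcc_some hay nd' j' ho').1
          simp_all
        simp only [pvMin, hj, hr, if_pos hjge]
    · rw [if_neg hm] at h
      have hmi : pvM hay nd i = false := by simpa [pvM, PySem.List.slice_natCast_add] using hm
      obtain ⟨L, hmin, hr⟩ := ih (fun nd' h' => hne nd' (by simp [h']))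
        (fun k hk nd' h' => hprev k hk nd' (by simp [h'])) h
      refine ⟨L, ?_, hr⟩
      cases ho : pvOcc hay nd with
      | none => simp only [pvMin, ho, hmin]
      | some j =>
        have hji : i < j := by
          have hmj := (pvOcc_some hay nd j ho).1
          rcases Nat.lt_trichotomy j i with hlt | rfl | hgt
          · have := hprev j hlt nd (by simp); simp_all
          · simp_all
          · exact hgt
        simp only [pvMin, ho, hmin, if_neg (by omega : ¬ j ≤ i)]

theorem pvBScan_spec (hay : List Int) (nds : List (List Int))
    (hne : ∀ nd ∈ nds, nd ≠ []) :
    ∀ i, (∀ k, k < i → ∀ nd ∈ nds, pvM hay nd k = false) →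
    pvBScan hay nds i
      = match pvMin hay nds with
        | none => (-1, 0)
        | some (p, L) => ((p : Int), (L : Int)) := by
  intro i
  induction i using pvBScan.induct hay nds with
  | case1 i hlt r hbt =>
    intro hprev
    rw [pvBScan, dif_pos hlt, hbt]
    obtain ⟨L, hmin, rfl⟩ := pvBTry_some hay i nds hne hprev r hbt
    rw [hmin]
  | case2 i hlt hbt ih =>
    intro hprev
    rw [pvBScan, dif_pos hlt, hbt]
    apply ih
    intro k hk nd hmem
    rcases Nat.lt_or_ge k i with h | h
    · exact hprev k h nd hmem
    · have : k = i := by omega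
      subst this
      exact pvBTry_none hay k nds hbt nd hmem
  | case3 i hlt =>
    intro hprev
    rw [pvBScan, dif_neg hlt]
    have hmin : pvMin hay nds = none := by
      apply pvMin_none
      intro nd hmem
      cases ho : pvOcc hay nd with
      | none => rfl
      | some j =>
        have hmj := (pvOcc_some hay nd j ho).1
        have hb := pvM_bound hay nd j (hne nd hmem) hmj
        have hL : nd.length ≠ 0 := by simpa using hne nd hmem
        have := hprev j (by omega) nd hmem
        simp_all
    rw [hmin]
theorem final_eq (hay : List Int) (needles : List (List Int)) :
    find_any_subseq hay needles = find_any_subseq_alt hay needles := by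
  have hne : ∀ nd ∈ needles.filter (fun nd => !nd.isEmpty), nd ≠ [] := by
    intro nd hmem
    have := List.of_mem_filter hmem
    simpa [List.isEmpty_iff] using this
  have hB : find_any_subseq_alt hay needles
      = match pvMin hay (needles.filter (fun nd => !nd.isEmpty)) with
        | none => (-1, 0)
        | some (p, L) => ((p : Int), (L : Int)) := by
    exact pvBScan_spec hay _ hne 0 (by omega)
  have hA : find_any_subseq hay needles
      = (let best :=
          match pvMin hay (needles.filter (fun nd => !nd.isEmpty)) with
          | none => ((hay.length : Int) + 1, 0)
          | some (i, L) => if (i : Int) < (hay.length : Int) + 1 then ((i : Int), (L : Int)) else ((hay.length : Int) + 1, 0)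
         if best.1 ≤ (hay.length : Int) then best else (-1, 0)) := by
    unfold find_any_subseq
    rw [pvFoldA_filter, pvFoldA_eq]
  rw [hA, hB]
  cases hmin : pvMin hay (needles.filter (fun nd => !nd.isEmpty)) with
  | none =>
    simp only []
    rw [if_neg (by omega)]
  | some p =>
    obtain ⟨i, L⟩ := p
    obtain ⟨nd, hmem, ho, rfl⟩ := pvMin_some_mem hay _ i L hmin
    have hmi := (pvOcc_some hay nd i ho).1
    have hb := pvM_bound hay nd i (hne nd hmem) hmi
    have hL : nd.length ≠ 0 := by simpa using hne nd hmem
    have h1 : (i : Int) < (hay.length : Int) + 1 := by omega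
    have h2 : (i : Int) ≤ (hay.length : Int) := by omega
    simp [h1, h2]

-- ===== VERDICT (by name: the statement is the Claim_ definition above) =====
theorem find_any_subseq_spec : Claim_equal_find_any_subseq := by
  intro hay needles _
  unfold Spec_find_any_subseq
  exact final_eq hay needles
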